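-- pv_equiv track=rewrite | github.com/DarkAce65/advent-of-code | 2021/day23.py | parse_folded_input
-- ===== SOURCE A (Python) =====
-- from typing import Iterable, Iterator, Optional, Sequence, TypeVar
--
-- def build_burrow_str(
--     rooms: Sequence[list[Optional[str]]], hallway_slots: Sequence[Optional[str]]
-- ) -> str:
--     s = ""
--     for room in rooms:
--         s += "".join(map(lambda slot: slot or ".", room))
--     s += "|"
--     s += "".join(map(lambda slot: slot or ".", hallway_slots))
--
--     return s
--
-- def parse_folded_input(problem_input: list[str]) -> str:
--     rooms: list[list[Optional[str]]] = []
--     for index in range(len(problem_input[2])):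
--         if problem_input[2][index].isalpha():
--             rooms.append(list(problem_input[2][index]))
--
--     unfolded_input = ["  #D#C#B#A#  ", "  #D#B#A#C#  "] + problem_input[3:]
--     for row in unfolded_input:
--         parsed_row = row.strip().replace("#", "")
--         for index in range(len(parsed_row)):
--             rooms[index].append(parsed_row[index])
--
--     hallway_slots = [None] * (len(problem_input[1].strip("#")) - len(rooms))
--
--     return build_burrow_str(rooms, hallway_slots)
-- ===== SOURCE B (Python) =====
-- def parse_folded_input(problem_input: list[str]) -> str:
--     # the burrow has exactly four rooms (the two hardcoded unfolded rows fix that)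
--     a, b, c, d = (ch for ch in problem_input[2] if ch.isalpha())
--     rows = [[a, b, c, d]] + [
--         list(row.strip().replace("#", ""))
--         for row in ["  #D#C#B#A#  ", "  #D#B#A#C#  "] + problem_input[3:]
--     ]
--     room_str = "".join(row[i] for i in range(4) for row in rows if i < len(row))
--     hallway = "." * (len(problem_input[1].strip("#")) - 4)
--     return room_str + "|" + hallway
-- ===== Notes on version B (the rewrite author's own statement) =====
-- stated objective: idiomatic
-- what changed: B destructures line 2 into the four room letters, builds the list of letter rows once with comprehensions, and emits the room portion as a column-by-column transpose comprehension over the fixed four columns, instead of A's mutable per-room column lists grown cell by cell through indexed appends in nested loops; the hallway is a string repeat instead of a list of Nones joined with a truthiness substitution.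
-- outside the precondition, e.g. on parse_folded_input(['###', '#.#', '#A#B#C#D#E#']): A returns 'ADDBCBCBADACE|', B raises ValueError
import Mathlib
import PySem

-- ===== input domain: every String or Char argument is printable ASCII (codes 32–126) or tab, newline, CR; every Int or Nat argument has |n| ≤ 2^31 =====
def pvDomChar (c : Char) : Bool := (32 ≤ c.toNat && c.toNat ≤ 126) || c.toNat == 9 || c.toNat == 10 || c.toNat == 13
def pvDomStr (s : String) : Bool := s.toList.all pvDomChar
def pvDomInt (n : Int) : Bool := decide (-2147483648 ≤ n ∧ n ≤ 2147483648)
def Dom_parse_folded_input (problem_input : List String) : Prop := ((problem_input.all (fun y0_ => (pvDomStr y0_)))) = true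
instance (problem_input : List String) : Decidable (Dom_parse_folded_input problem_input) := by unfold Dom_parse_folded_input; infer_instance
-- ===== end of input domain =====

-- B (idiomatic): destructure line 2 into the four room letters, keep the burrow as a list of
-- ROWS of letters and emit the rooms as a column-by-column transpose, instead of A's mutable
-- column lists grown cell by cell with indexed appends.

-- ===== PORT A =====
-- every room slot A ever stores is a single letter (a nonempty 1-char string), so Python's
-- `slot or "."` is the slot itself on the rooms; hallway slots are all None and become '.'
def build_burrow_str (rooms : List (List Char)) (hallway_slots : List (Option Char)) : String :=
  let s : String := rooms.foldl (fun s room => s ++ String.ofList room) ""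
  let s := s ++ "|"
  s ++ String.ofList (hallway_slots.map (fun slot => slot.getD '.'))

def parse_folded_input (problem_input : List String) : String :=
  -- problem_input[2] / problem_input[1]: in range under Pre_ (pyGetD default is never read there)
  let line2 := (PySem.List.pyGetD problem_input 2 "").toList
  let rooms : List (List Char) :=
    (PySem.List.pyRange 0 (line2.length : Int) 1).foldl
      (fun rooms index =>
        if PySem.Chars.isalpha (PySem.List.pyGetD line2 index ' ') then
          rooms ++ [[PySem.List.pyGetD line2 index ' ']]
        else rooms) []
  let unfolded_input := ["  #D#C#B#A#  ", "  #D#B#A#C#  "] ++ problem_input.drop 3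
  let rooms := unfolded_input.foldl
    (fun rooms row =>
      let parsed_row := (PySem.Str.replace (PySem.Str.strip row) "#" "").toList
      (PySem.List.pyRange 0 (parsed_row.length : Int) 1).foldl
        (fun rooms index =>
          -- rooms[index].append(...): index < len(rooms) under Pre_ (out of range Python raises;
          -- List.modify is then a no-op, outside the claim)
          rooms.modify index.toNat (fun room => room ++ [PySem.List.pyGetD parsed_row index ' ']))
        rooms)
    rooms
  let hallway_slots : List (Option Char) :=
    List.replicate
      (PySem.Str.len (PySem.Str.stripChars (PySem.List.pyGetD problem_input 1 "") "#")
        - (rooms.length : Int)).toNat none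
  build_burrow_str rooms hallway_slots

-- ===== PORT B =====
def parse_folded_input_alt (problem_input : List String) : String :=
  -- a, b, c, d = (ch for ch in problem_input[2] if ch.isalpha()): the unpacking succeeds only
  -- when line 2 has exactly four letters; elsewhere Python raises ValueError (outside Pre_,
  -- where this port's value is not claimed)
  match (PySem.List.pyGetD problem_input 2 "").toList.filter PySem.Chars.isalpha with
  | [a, b, c, d] =>
    let rows : List (List Char) :=
      [a, b, c, d] ::
        (["  #D#C#B#A#  ", "  #D#B#A#C#  "] ++ problem_input.drop 3).map
          (fun row => (PySem.Str.replace (PySem.Str.strip row) "#" "").toList)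
    let room_str :=
      String.ofList ((List.range 4).flatMap (fun i => rows.filterMap (fun row => row[i]?)))
    let hallway :=
      String.ofList (List.replicate
        (PySem.Str.len (PySem.Str.stripChars (PySem.List.pyGetD problem_input 1 "") "#")
          - (4 : Int)).toNat '.')
    room_str ++ "|" ++ hallway
  | _ => ""

-- ===== PRECONDITION & SPEC =====
-- Pre_ excludes the inputs on which the Python A raises IndexError (fewer than 3 lines, or a
-- row whose stripped '#'-free content is wider than the number of room letters on line 2) and
-- the inputs where line 2 does not have exactly 4 letters — the room count the two hardcoded
-- unfolded rows fix — on which A happily builds a non-4-room burrow while B's four-name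
-- unpacking raises ValueError.
def Pre_parse_folded_input (problem_input : List String) : Prop :=
  3 ≤ problem_input.length ∧
  ((PySem.List.pyGetD problem_input 2 "").toList.filter PySem.Chars.isalpha).length = 4 ∧
  ∀ row ∈ problem_input.drop 3,
    (PySem.Str.replace (PySem.Str.strip row) "#" "").toList.length ≤ 4
instance (problem_input : List String) : Decidable (Pre_parse_folded_input problem_input) := by
  unfold Pre_parse_folded_input; infer_instance

def pvWitness_parse_folded_input : List String :=
  ["#############", "#...........#", "###B#C#B#D###", "  #A#D#C#A#", "  #########"]

def Spec_parse_folded_input (problem_input : List String) (out : String) : Prop := out = parse_folded_input_alt problem_input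
instance (problem_input : List String) (out : String) : Decidable (Spec_parse_folded_input problem_input out) := by unfold Spec_parse_folded_input; infer_instance

-- ===== CLAIM (what is proved, stated in full; the proofs are below) =====
def Claim_equal_parse_folded_input : Prop := ∀ (problem_input : List String), Dom_parse_folded_input problem_input → Pre_parse_folded_input problem_input → Spec_parse_folded_input problem_input (parse_folded_input problem_input)

-- ===== LEMMAS AND PROOFS =====
lemma singleton_map_range (l : List Char) :
    l.map (fun c => [c]) = (List.range l.length).map (fun j => l[j]?.toList) := by
  apply List.ext_getElem
  · simp
  · intro i h1 h2
    have hi : i < l.length := by simpa using h1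
    simp [List.getElem?_eq_getElem hi]

lemma modify_map_range (n m : Nat) (g : Nat → List Char) (f : List Char → List Char) :
    ((List.range n).map g).modify m f
      = (List.range n).map (fun j => if m = j then f (g j) else g j) := by
  apply List.ext_getElem
  · simp
  · intro i h1 h2
    simp_all [List.getElem_modify]

lemma step_lemma (row : List Char) (n : Nat) (g : Nat → List Char) (h : row.length ≤ n) :
    (PySem.List.pyRange 0 (row.length : Int) 1).foldl
      (fun rooms (index : Int) =>
        rooms.modify index.toNat (fun room => room ++ [PySem.List.pyGetD row index ' ']))
      ((List.range n).map g)
    = (List.range n).map (fun j => g j ++ (row[j]?.toList)) := by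
  induction row using List.reverseRecOn generalizing g with
  | nil => simp [PySem.List.pyRange_one_eq_nil]
  | append_singleton xs c ih =>
    have hlen : ((xs ++ [c]).length : Int) = (xs.length : Int) + 1 := by simp
    rw [hlen, PySem.List.pyRange_one_succ_right (by positivity), List.foldl_append]
    have hcongr :
        (PySem.List.pyRange 0 (xs.length : Int) 1).foldl
          (fun rooms (index : Int) =>
            rooms.modify index.toNat (fun room => room ++ [PySem.List.pyGetD (xs ++ [c]) index ' ']))
          ((List.range n).map g)
        = (PySem.List.pyRange 0 (xs.length : Int) 1).foldl
          (fun rooms (index : Int) =>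
            rooms.modify index.toNat (fun room => room ++ [PySem.List.pyGetD xs index ' ']))
          ((List.range n).map g) := by
      apply PySem.List.foldl_congr_mem
      intro acc x hx
      rw [PySem.List.mem_pyRange_one] at hx
      have hx0 : x = ((x.toNat : Nat) : Int) := by omega
      have hxl : x.toNat < xs.length := by omega
      rw [hx0, PySem.List.pyGetD_natCast, PySem.List.pyGetD_natCast]
      congr 2
      rw [List.getD, List.getD, List.getElem?_append_left hxl]
    rw [hcongr, ih _ (by simp at h; omega)]
    simp only [List.foldl_cons, List.foldl_nil, Int.toNat_natCast]
    rw [PySem.List.pyGetD_natCast, modify_map_range]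
    apply List.map_congr_left
    intro j hj
    simp only [List.mem_range] at hj
    have hgd : (xs ++ [c]).getD xs.length ' ' = c := by
      rw [List.getD, List.getElem?_append_right (le_refl _)]
      simp
    rw [hgd]
    rcases lt_trichotomy j xs.length with hlt | heq | hgt
    · rw [if_neg (by omega), List.getElem?_append_left hlt]
    · subst heq
      rw [if_pos rfl, List.getElem?_append_right (le_refl _)]
      simp
    · rw [if_neg (by omega), List.getElem?_eq_none (by omega),
        List.getElem?_eq_none (by simp; omega)]

lemma outer_lemma (rs : List String) (n : Nat) (g : Nat → List Char)
    (h : ∀ row ∈ rs, (PySem.Str.replace (PySem.Str.strip row) "#" "").toList.length ≤ n) :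
    rs.foldl (fun rooms row =>
        (PySem.List.pyRange 0 (((PySem.Str.replace (PySem.Str.strip row) "#" "").toList.length : Int)) 1).foldl
          (fun rooms (index : Int) =>
            rooms.modify index.toNat (fun room =>
              room ++ [PySem.List.pyGetD (PySem.Str.replace (PySem.Str.strip row) "#" "").toList index ' ']))
          rooms)
      ((List.range n).map g)
    = (List.range n).map (fun j =>
        g j ++ rs.flatMap (fun row => ((PySem.Str.replace (PySem.Str.strip row) "#" "").toList)[j]?.toList)) := by
  induction rs generalizing g with
  | nil => simp
  | cons r rs ih =>
    rw [List.foldl_cons, step_lemma _ n g (h r (by simp)),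
      ih _ (fun row hrow => h row (by simp [hrow]))]
    apply List.map_congr_left
    intro j hj
    simp [List.append_assoc]

lemma build_flat (rooms : List (List Char)) (s : String) :
    rooms.foldl (fun s room => s ++ String.ofList room) s = s ++ String.ofList rooms.flatten := by
  induction rooms generalizing s with
  | nil => simp
  | cons r rs ih => simp [ih, String.ofList_append, String.append_assoc]


lemma length_eq_four_exists {α : Type} {l : List α} (h : l.length = 4) :
    ∃ a b c d, l = [a, b, c, d] := by
  rcases l with _ | ⟨a, _ | ⟨b, _ | ⟨c, _ | ⟨d, _ | ⟨e, t⟩⟩⟩⟩⟩ <;>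
    first
      | exact ⟨a, b, c, d, rfl⟩
      | simp at h

-- ===== VERDICT (by name: the statement is the Claim_ definition above) =====
theorem parse_folded_input_spec : Claim_equal_parse_folded_input := by
  intro pi _hdom hpre
  obtain ⟨h3, h4, hrows⟩ := hpre
  obtain ⟨a, b, c, d, hr0⟩ := length_eq_four_exists h4
  unfold Spec_parse_folded_input
  simp only [parse_folded_input, parse_folded_input_alt, build_burrow_str, hr0]
  have h1 :
      (PySem.List.pyRange 0 ((PySem.List.pyGetD pi 2 "").toList.length : Int) 1).foldl
        (fun rooms index =>
          if PySem.Chars.isalpha (PySem.List.pyGetD (PySem.List.pyGetD pi 2 "").toList index ' ') = true then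
            rooms ++ [[PySem.List.pyGetD (PySem.List.pyGetD pi 2 "").toList index ' ']]
          else rooms) []
      = (List.range ([a, b, c, d] : List Char).length).map
          (fun j => ([a, b, c, d] : List Char)[j]?.toList) := by
    rw [PySem.List.foldl_pyRange_zero_pyGetD' (PySem.List.pyGetD pi 2 "").toList ' '
        (fun rooms ch => if PySem.Chars.isalpha ch = true then rooms ++ [[ch]] else rooms) [],
      PySem.List.foldl_append_if, List.nil_append, singleton_map_range, hr0]
  rw [h1]
  have hall : ∀ row ∈ ["  #D#C#B#A#  ", "  #D#B#A#C#  "] ++ List.drop 3 pi,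
      (PySem.Str.replace (PySem.Str.strip row) "#" "").toList.length ≤
        ([a, b, c, d] : List Char).length := by
    intro row hrow
    simp only [List.length_cons, List.length_nil]
    rcases List.mem_append.1 hrow with hm | hm
    · simp only [List.mem_cons, List.not_mem_nil, or_false] at hm
      rcases hm with h | h
      · subst h; decide
      · subst h; decide
    · exact hrows row hm
  rw [outer_lemma _ _ _ hall, build_flat, String.empty_append]
  simp only [List.filterMap_eq_flatMap_toList, List.flatMap_cons, List.flatMap_map,
    List.map_replicate, Option.getD_none, List.length_map, List.length_range,
    List.length_cons, List.length_nil, ← List.flatMap_def]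
  norm_num
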